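-- pv_equiv track=rewrite | github.com/steveyoung-random/cassiel-legal-workbench | utils/document_handling.py | _chunk_text_at_level
-- ===== SOURCE A (Python) =====
-- def _chunk_text_at_level(text, region_start, region_end, breakpoints, levels, level_index, preferred_length):
--     """
--     Chunk a region of text using breakpoints at levels[level_index].
--
--     When a segment still exceeds preferred_length after splitting at this level,
--     recursively sub-chunks it using the next level (level_index + 1).
--
--     Args:
--         text: The full text string.
--         region_start: Start offset of the region to chunk (inclusive).
--         region_end: End offset of the region to chunk (exclusive).
--         breakpoints: Full list of [position, level] breakpoints.
--         levels: Sorted list of unique breakpoint levels.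
--         level_index: Index into levels for the current splitting level.
--         preferred_length: Target maximum chunk size in characters.
--     """
--     if region_start >= region_end:
--         return
--
--     if level_index >= len(levels):
--         # No more levels available; yield the region as-is.
--         yield text[region_start:region_end]
--         return
--
--     current_level = levels[level_index]
--
--     # Collect breakpoint positions at this level within [region_start, region_end).
--     split_positions = [
--         entry[0] for entry in breakpoints
--         if entry[1] == current_level and region_start < entry[0] < region_end
--     ]
--
--     if not split_positions:
--         # No breakpoints at this level in this region; try next level.
--         yield from _chunk_text_at_level(text, region_start, region_end, breakpoints, levels, level_index + 1, preferred_length)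
--         return
--
--     # Walk through segments defined by these breakpoints.
--     # Segments: [region_start..split_positions[0]], [split_positions[0]..split_positions[1]], ...
--     # Accumulate adjacent segments as long as total stays under preferred_length.
--     current_start = region_start
--     current_end = region_start  # The last accepted breakpoint position.
--
--     for pos in split_positions:
--         segment_length = pos - current_start
--         if segment_length < preferred_length:
--             # Still within budget; extend the accumulated region.
--             current_end = pos
--         else:
--             # This segment would exceed preferred_length.
--             if current_start == current_end:
--                 # No accumulated text before this point; the single segment
--                 # from current_start to pos is oversized. Sub-chunk it.
--                 yield from _sub_chunk_segment(text, current_start, pos, breakpoints, levels, level_index + 1, preferred_length)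
--                 current_start = pos
--                 current_end = pos
--             else:
--                 # Yield the accumulated region up to current_end.
--                 yield text[current_start:current_end]
--                 current_start = current_end
--                 current_end = pos
--                 # Check if the new segment (current_start to pos) is also oversized.
--                 if (pos - current_start) >= preferred_length:
--                     yield from _sub_chunk_segment(text, current_start, pos, breakpoints, levels, level_index + 1, preferred_length)
--                     current_start = pos
--                     current_end = pos
--
--     # Yield remaining text from current_start to region_end.
--     if current_start < region_end:
--         remaining = region_end - current_start
--         if remaining >= preferred_length and current_start != current_end:
--             # Yield accumulated portion, then sub-chunk the rest.
--             yield text[current_start:current_end]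
--             yield from _sub_chunk_segment(text, current_end, region_end, breakpoints, levels, level_index + 1, preferred_length)
--         elif remaining >= preferred_length:
--             # Single oversized tail; sub-chunk it.
--             yield from _sub_chunk_segment(text, current_start, region_end, breakpoints, levels, level_index + 1, preferred_length)
--         else:
--             yield text[current_start:region_end]
--
-- def _sub_chunk_segment(text, seg_start, seg_end, breakpoints, levels, next_level_index, preferred_length):
--     """
--     Sub-chunk an oversized segment by trying the next breakpoint level.
--
--     If no further levels are available, yields the segment as-is.
--     """
--     if next_level_index < len(levels):
--         yield from _chunk_text_at_level(text, seg_start, seg_end, breakpoints, levels, next_level_index, preferred_length)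
--     else:
--         yield text[seg_start:seg_end]
-- ===== SOURCE B (Python) =====
-- # B: iterative worklist (explicit LIFO stack of region/emit tasks) instead of A's recursive
-- # generators, with a per-level position index built once instead of rescanning all breakpoints.
--
-- def _chunk_text_at_level(text, region_start, region_end, breakpoints, levels, level_index, preferred_length):
--     by_level = {}
--     for entry in breakpoints:
--         by_level.setdefault(entry[1], []).append(entry[0])
--     out = []
--     # task = (start, end, li, emit): emit=True means "append text[start:end] as-is"
--     stack = [(region_start, region_end, level_index, False)]
--     while stack:
--         s, e, li, emit = stack.pop()
--         if emit:
--             out.append(text[s:e])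
--             continue
--         if s >= e:
--             continue
--         if li >= len(levels):
--             out.append(text[s:e])
--             continue
--         positions = [p for p in by_level.get(levels[li], []) if s < p < e]
--         if not positions:
--             stack.append((s, e, li + 1, False))
--             continue
--         items = _region_items(s, e, li, positions, preferred_length, len(levels))
--         stack.extend(reversed(items))
--     return out
--
-- def _region_items(s, e, li, positions, preferred_length, num_levels):
--     # Pure planning pass: the tasks this region contributes, in output order.
--     items = []
--     cs = ce = s
--     for pos in positions:
--         if pos - cs < preferred_length:
--             ce = pos
--         elif cs == ce:
--             items.append(_sub_task(cs, pos, li, num_levels))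
--             cs = ce = pos
--         else:
--             items.append((cs, ce, li, True))
--             if pos - ce >= preferred_length:
--                 items.append(_sub_task(ce, pos, li, num_levels))
--                 cs = ce = pos
--             else:
--                 cs, ce = ce, pos
--     if cs < e:
--         if e - cs >= preferred_length and cs != ce:
--             items.append((cs, ce, li, True))
--             items.append(_sub_task(ce, e, li, num_levels))
--         elif e - cs >= preferred_length:
--             items.append(_sub_task(cs, e, li, num_levels))
--         else:
--             items.append((cs, e, li, True))
--     return items
--
-- def _sub_task(s, e, li, num_levels):
--     if li + 1 < num_levels:
--         return (s, e, li + 1, False)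
--     return (s, e, li, True)
-- ===== Notes on version B (the rewrite author's own statement) =====
-- stated objective: alternative
-- what changed: B replaces A's recursive generators with a single iterative worklist loop over an explicit LIFO stack of region/emit tasks (oversized segments are deferred as stack tasks instead of being expanded depth-first by recursive 'yield from'), and it indexes breakpoint positions per level once so each region filters only its level's bucket instead of rescanning the whole breakpoint list.
-- outside the precondition, e.g. on _chunk_text_at_level('', 1, 0, [[]], [], 0, 1): A returns [], B raises IndexError
import Mathlib
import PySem

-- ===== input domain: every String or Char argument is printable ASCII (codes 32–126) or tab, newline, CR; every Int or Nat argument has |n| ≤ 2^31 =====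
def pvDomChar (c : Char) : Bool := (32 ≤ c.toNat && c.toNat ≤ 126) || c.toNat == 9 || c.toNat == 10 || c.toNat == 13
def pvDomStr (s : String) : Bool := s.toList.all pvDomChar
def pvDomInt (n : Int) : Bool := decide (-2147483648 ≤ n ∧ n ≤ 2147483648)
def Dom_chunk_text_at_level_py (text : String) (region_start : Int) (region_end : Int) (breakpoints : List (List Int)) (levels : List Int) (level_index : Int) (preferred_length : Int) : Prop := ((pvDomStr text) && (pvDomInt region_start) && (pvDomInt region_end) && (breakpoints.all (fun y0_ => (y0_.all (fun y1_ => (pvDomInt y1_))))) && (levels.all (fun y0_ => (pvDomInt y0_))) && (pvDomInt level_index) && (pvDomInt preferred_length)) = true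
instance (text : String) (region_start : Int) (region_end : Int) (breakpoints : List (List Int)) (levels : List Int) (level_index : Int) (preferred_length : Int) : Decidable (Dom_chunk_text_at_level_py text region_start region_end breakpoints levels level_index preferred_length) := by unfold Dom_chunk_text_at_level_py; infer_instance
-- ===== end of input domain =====

-- B replaces A's recursive generators with one iterative worklist loop over an explicit stack of
-- region/emit tasks, plus a per-level position index built once; equivalence of the RETURN value
-- (the generators' yielded lists) is proved on Pre_.

-- ===== PORT A =====
-- literal transliteration of _chunk_text_at_level / _sub_chunk_segment (generators → lists of the
-- yielded strings).  The for-loop over split_positions becomes loopA_py: structural recursion over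
-- the same (acc, current_start, current_end) state, with the loop body's
-- `yield from _sub_chunk_segment(..., level_index + 1, ...)` supplied as the closure `sub`.
def loopA_py (text : String) (preferred_length : Int) (sub : Int → Int → List String) :
    List Int → List String → Int → Int → List String × Int × Int
  | [], acc, current_start, current_end => (acc, current_start, current_end)
  | pos :: rest, acc, current_start, current_end =>
    if pos - current_start < preferred_length then
      loopA_py text preferred_length sub rest acc current_start pos
    else if current_start = current_end then
      loopA_py text preferred_length sub rest (acc ++ sub current_start pos) pos pos
    else
      let acc' := acc ++ [PySem.Str.slice text (some current_start) (some current_end)]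
      if pos - current_end ≥ preferred_length then
        loopA_py text preferred_length sub rest (acc' ++ sub current_end pos) pos pos
      else
        loopA_py text preferred_length sub rest acc' current_end pos

-- The recursion of A always moves to level_index + 1, so it terminates after at most
-- len(levels) - level_index further calls; `fuel` is exactly that totality guard (structural,
-- so the kernel can evaluate the port), spent one unit per level step.  `_sub_chunk_segment`
-- is inlined at its two call shapes (its body is the single `if next_level_index < len(levels)`).
def chunkA_py (text : String) (breakpoints : List (List Int)) (levels : List Int) (preferred_length : Int) :
    Nat → Int → Int → Int → List String
  | 0, _, _, _ => []
  | n + 1, region_start, region_end, level_index =>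
    if region_start ≥ region_end then []
    else if level_index ≥ (levels.length : Int) then [PySem.Str.slice text (some region_start) (some region_end)]
    else
      let current_level := PySem.List.pyGetD levels level_index 0
      let split_positions := (breakpoints.filter (fun entry =>
          (PySem.List.pyGetD entry 1 0 == current_level) &&
          decide (region_start < PySem.List.pyGetD entry 0 0) &&
          decide (PySem.List.pyGetD entry 0 0 < region_end))).map (fun entry => PySem.List.pyGetD entry 0 0)
      -- _sub_chunk_segment(text, s, e, breakpoints, levels, level_index + 1, preferred_length)
      let sub := fun (s e : Int) =>
        if level_index + 1 < (levels.length : Int) then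
          chunkA_py text breakpoints levels preferred_length n s e (level_index + 1)
        else [PySem.Str.slice text (some s) (some e)]
      if split_positions = [] then
        chunkA_py text breakpoints levels preferred_length n region_start region_end (level_index + 1)
      else
        let r := loopA_py text preferred_length sub split_positions [] region_start region_start
        r.1 ++
          (if r.2.1 < region_end then
            (if region_end - r.2.1 ≥ preferred_length ∧ r.2.1 ≠ r.2.2 then
              [PySem.Str.slice text (some r.2.1) (some r.2.2)] ++ sub r.2.2 region_end
            else if region_end - r.2.1 ≥ preferred_length then
              sub r.2.1 region_end
            else [PySem.Str.slice text (some r.2.1) (some region_end)])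
          else [])

def chunk_text_at_level_py (text : String) (region_start : Int) (region_end : Int) (breakpoints : List (List Int)) (levels : List Int) (level_index : Int) (preferred_length : Int) : List String :=
  chunkA_py text breakpoints levels preferred_length
    (((levels.length : Int) - level_index).toNat + 1) region_start region_end level_index

-- ===== PORT B =====
-- helpers of Source B.  `by_level.setdefault(entry[1], []).append(entry[0])` is ported as insert of
-- (getD ++ [v]): identical Dict value and key order.
def buildIndex_alt (breakpoints : List (List Int)) : PySem.Dict Int (List Int) :=
  breakpoints.foldl (fun d entry =>
    let k := PySem.List.pyGetD entry 1 0
    d.insert k (d.getD k [] ++ [PySem.List.pyGetD entry 0 0])) PySem.Dict.empty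

-- _sub_task
def subTask_alt (numLevels : Int) (s e li : Int) : Int × Int × Int × Bool :=
  if li + 1 < numLevels then (s, e, li + 1, false) else (s, e, li, true)

-- the for-loop of _region_items: same (items, cs, ce) state
def itemsLoop_alt (numLevels pl li : Int) :
    List Int → Int → Int → List (Int × Int × Int × Bool) → List (Int × Int × Int × Bool) × Int × Int
  | [], cs, ce, items => (items, cs, ce)
  | pos :: ps, cs, ce, items =>
    if pos - cs < pl then itemsLoop_alt numLevels pl li ps cs pos items
    else if cs = ce then
      itemsLoop_alt numLevels pl li ps pos pos (items ++ [subTask_alt numLevels cs pos li])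
    else
      let items' := items ++ [(cs, ce, li, true)]
      if pos - ce ≥ pl then
        itemsLoop_alt numLevels pl li ps pos pos (items' ++ [subTask_alt numLevels ce pos li])
      else itemsLoop_alt numLevels pl li ps ce pos items'

-- _region_items
def regionItems_alt (numLevels pl : Int) (s e li : Int) (positions : List Int) :
    List (Int × Int × Int × Bool) :=
  let r := itemsLoop_alt numLevels pl li positions s s []
  r.1 ++
    (if r.2.1 < e then
      if e - r.2.1 ≥ pl ∧ r.2.1 ≠ r.2.2 then
        [(r.2.1, r.2.2, li, true), subTask_alt numLevels r.2.2 e li]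
      else if e - r.2.1 ≥ pl then [subTask_alt numLevels r.2.1 e li]
      else [(r.2.1, e, li, true)]
    else [])

-- fuel bound for the worklist loop (totality guard only): weight of one region task at level li
def taskFuel_alt (K L : Nat) (li : Int) : Nat := (2 * K + 3) ^ (((L : Int) - li).toNat + 1)

-- the `while stack:` loop; Python pushes reversed(items) and pops from the end, which is
-- items ++ stack with the stack's top at the list head
def run_alt (text : String) (byLevel : PySem.Dict Int (List Int)) (levels : List Int) (pl : Int) :
    Nat → List (Int × Int × Int × Bool) → List String → List String
  | 0, _, out => out
  | _ + 1, [], out => out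
  | n + 1, (s, e, li, emit) :: stack, out =>
    if emit then
      run_alt text byLevel levels pl n stack (out ++ [PySem.Str.slice text (some s) (some e)])
    else if s ≥ e then run_alt text byLevel levels pl n stack out
    else if li ≥ (levels.length : Int) then
      run_alt text byLevel levels pl n stack (out ++ [PySem.Str.slice text (some s) (some e)])
    else
      let positions := (byLevel.getD (PySem.List.pyGetD levels li 0) []).filter
        (fun p => decide (s < p) && decide (p < e))
      if positions = [] then run_alt text byLevel levels pl n ((s, e, li + 1, false) :: stack) out
      else run_alt text byLevel levels pl n
        (regionItems_alt (levels.length : Int) pl s e li positions ++ stack) out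

def chunk_text_at_level_py_alt (text : String) (region_start : Int) (region_end : Int) (breakpoints : List (List Int)) (levels : List Int) (level_index : Int) (preferred_length : Int) : List String :=
  run_alt text (buildIndex_alt breakpoints) levels preferred_length
    (taskFuel_alt breakpoints.length levels.length level_index)
    [(region_start, region_end, level_index, false)] []

-- ===== PRECONDITION & SPEC =====
-- Pre_ excludes exactly the inputs where the Python raises IndexError: breakpoint entries with
-- fewer than two elements (malformed; B's index pass inspects them even when A's early return
-- does not — see claim cites), and a level_index below -len(levels) reached while splitting.
def Pre_chunk_text_at_level_py (text : String) (region_start : Int) (region_end : Int) (breakpoints : List (List Int)) (levels : List Int) (level_index : Int) (preferred_length : Int) : Prop :=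
  (∀ e ∈ breakpoints, 2 ≤ e.length) ∧
  (region_start < region_end → level_index < (levels.length : Int) → -(levels.length : Int) ≤ level_index)
instance (text : String) (region_start : Int) (region_end : Int) (breakpoints : List (List Int)) (levels : List Int) (level_index : Int) (preferred_length : Int) : Decidable (Pre_chunk_text_at_level_py text region_start region_end breakpoints levels level_index preferred_length) := by unfold Pre_chunk_text_at_level_py; infer_instance

def pvWitness_chunk_text_at_level_py : String × Int × Int × List (List Int) × List Int × Int × Int :=
  ("ab cd ef", 0, 8, [[2, 1], [5, 1]], [1], 0, 4)

def Spec_chunk_text_at_level_py (text : String) (region_start : Int) (region_end : Int) (breakpoints : List (List Int)) (levels : List Int) (level_index : Int) (preferred_length : Int) (out : List String) : Prop := out = chunk_text_at_level_py_alt text region_start region_end breakpoints levels level_index preferred_length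
instance (text : String) (region_start : Int) (region_end : Int) (breakpoints : List (List Int)) (levels : List Int) (level_index : Int) (preferred_length : Int) (out : List String) : Decidable (Spec_chunk_text_at_level_py text region_start region_end breakpoints levels level_index preferred_length out) := by unfold Spec_chunk_text_at_level_py; infer_instance

-- ===== CLAIM (what is proved, stated in full; the proofs are below) =====
def Claim_equal_chunk_text_at_level_py : Prop := ∀ (text : String) (region_start : Int) (region_end : Int) (breakpoints : List (List Int)) (levels : List Int) (level_index : Int) (preferred_length : Int), Dom_chunk_text_at_level_py text region_start region_end breakpoints levels level_index preferred_length → Pre_chunk_text_at_level_py text region_start region_end breakpoints levels level_index preferred_length → Spec_chunk_text_at_level_py text region_start region_end breakpoints levels level_index preferred_length (chunk_text_at_level_py text region_start region_end breakpoints levels level_index preferred_length)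

-- ===== LEMMAS AND PROOFS =====

-- meaning of one task: emit tasks are one slice; region tasks mean A's chunking of that region
def evalT (text : String) (breakpoints : List (List Int)) (levels : List Int) (pl : Int)
    (t : Int × Int × Int × Bool) : List String :=
  if t.2.2.2 then [PySem.Str.slice text (some t.1) (some t.2.1)]
  else chunkA_py text breakpoints levels pl (((levels.length : Int) - t.2.2.1).toNat + 1) t.1 t.2.1 t.2.2.1

def wItem (K L : Nat) (t : Int × Int × Int × Bool) : Nat :=
  if t.2.2.2 then 1 else taskFuel_alt K L t.2.2.1

def wStack (K L : Nat) (st : List (Int × Int × Int × Bool)) : Nat := (st.map (wItem K L)).sum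

theorem buildIndex_aux (lv : Int) : ∀ (bps : List (List Int)) (d : PySem.Dict Int (List Int)),
    (bps.foldl (fun d entry =>
      let k := PySem.List.pyGetD entry 1 0
      d.insert k (d.getD k [] ++ [PySem.List.pyGetD entry 0 0])) d).getD lv [] =
    d.getD lv [] ++ (bps.filter (fun e => PySem.List.pyGetD e 1 0 == lv)).map (fun e => PySem.List.pyGetD e 0 0) := by
  intro bps
  induction bps with
  | nil => intro d; simp
  | cons e rest ih =>
    intro d
    simp only [List.foldl_cons, List.filter_cons, ih]
    by_cases h : PySem.List.pyGetD e 1 0 = lv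
    · simp [h]
    · simp only [PySem.Dict.getD_insert]
      rw [if_neg (fun h' => h h'.symm)]
      simp [h]

theorem buildIndex_getD (breakpoints : List (List Int)) (lv : Int) :
    (buildIndex_alt breakpoints).getD lv [] =
      (breakpoints.filter (fun e => PySem.List.pyGetD e 1 0 == lv)).map (fun e => PySem.List.pyGetD e 0 0) := by
  simpa using buildIndex_aux lv breakpoints PySem.Dict.empty

theorem positions_eq (breakpoints : List (List Int)) (lv rs re : Int) :
    ((buildIndex_alt breakpoints).getD lv []).filter (fun p => decide (rs < p) && decide (p < re)) =
      (breakpoints.filter (fun entry =>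
        (PySem.List.pyGetD entry 1 0 == lv) &&
        decide (rs < PySem.List.pyGetD entry 0 0) &&
        decide (PySem.List.pyGetD entry 0 0 < re))).map (fun entry => PySem.List.pyGetD entry 0 0) := by
  rw [buildIndex_getD, List.filter_map, List.filter_filter]
  congr 1
  apply List.filter_congr
  intro e _
  cases h1 : (PySem.List.pyGetD e 1 0 == lv) <;>
    cases h2 : decide (rs < PySem.List.pyGetD e 0 0) <;>
      cases h3 : decide (PySem.List.pyGetD e 0 0 < re) <;> simp_all

-- itemsLoop threads its accumulator by appending
theorem itemsLoop_acc (numLevels pl li : Int) : ∀ (ps : List Int) (cs ce : Int)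
    (its : List (Int × Int × Int × Bool)),
    itemsLoop_alt numLevels pl li ps cs ce its =
      (its ++ (itemsLoop_alt numLevels pl li ps cs ce []).1,
       (itemsLoop_alt numLevels pl li ps cs ce []).2) := by
  intro ps
  induction ps with
  | nil => intro cs ce its; simp [itemsLoop_alt]
  | cons p rest ih =>
    intro cs ce its
    by_cases h1 : p - cs < pl
    · simp only [itemsLoop_alt, if_pos h1]; exact ih cs p its
    · by_cases h2 : cs = ce
      · simp only [itemsLoop_alt, if_neg h1, if_pos h2, List.nil_append]
        rw [ih p p (its ++ [subTask_alt numLevels cs p li]),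
            ih p p [subTask_alt numLevels cs p li]]
        simp
      · by_cases h3 : p - ce ≥ pl
        · simp only [itemsLoop_alt, if_neg h1, if_neg h2, if_pos h3, List.nil_append]
          rw [ih p p (its ++ [(cs, ce, li, true)] ++ [subTask_alt numLevels ce p li]),
              ih p p ([(cs, ce, li, true)] ++ [subTask_alt numLevels ce p li])]
          simp
        · simp only [itemsLoop_alt, if_neg h1, if_neg h2, if_neg h3, List.nil_append]
          rw [ih ce p (its ++ [(cs, ce, li, true)]), ih ce p [(cs, ce, li, true)]]
          simp

-- A's accumulate-and-yield loop equals rendering B's task items, for ANY renderer rnd that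
-- renders emit tasks as slices and sub tasks as A's sub closure
theorem loopA_items (text : String) (pl numLevels li : Int) (sub : Int → Int → List String)
    (rnd : Int × Int × Int × Bool → List String)
    (hlit : ∀ s e : Int, rnd (s, e, li, true) = [PySem.Str.slice text (some s) (some e)])
    (hsub : ∀ s e : Int, rnd (subTask_alt numLevels s e li) = sub s e) :
    ∀ (ps : List Int) (acc : List String) (cs ce : Int),
      loopA_py text pl sub ps acc cs ce =
        (acc ++ ((itemsLoop_alt numLevels pl li ps cs ce []).1.map rnd).flatten,
         (itemsLoop_alt numLevels pl li ps cs ce []).2) := by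
  intro ps
  induction ps with
  | nil => intro acc cs ce; simp [loopA_py, itemsLoop_alt]
  | cons p rest ih =>
    intro acc cs ce
    by_cases h1 : p - cs < pl
    · simp only [loopA_py, itemsLoop_alt, if_pos h1]; exact ih acc cs p
    · by_cases h2 : cs = ce
      · simp only [loopA_py, itemsLoop_alt, if_neg h1, if_pos h2, List.nil_append]
        rw [ih, itemsLoop_acc numLevels pl li rest p p [subTask_alt numLevels cs p li]]
        simp [hsub, List.append_assoc]
      · by_cases h3 : p - ce ≥ pl
        · simp only [loopA_py, itemsLoop_alt, if_neg h1, if_neg h2, if_pos h3, List.nil_append]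
          rw [ih, itemsLoop_acc numLevels pl li rest p p
              ([(cs, ce, li, true)] ++ [subTask_alt numLevels ce p li])]
          simp [hlit, hsub, List.append_assoc]
        · simp only [loopA_py, itemsLoop_alt, if_neg h1, if_neg h2, if_neg h3, List.nil_append]
          rw [ih, itemsLoop_acc numLevels pl li rest ce p [(cs, ce, li, true)]]
          simp [hlit, List.append_assoc]

-- weight bookkeeping for the items a region spawns
theorem one_le_taskFuel (K L : Nat) (li : Int) : 1 ≤ taskFuel_alt K L li :=
  Nat.one_le_pow _ _ (by omega)

theorem wStack_cons (K L : Nat) (t : Int × Int × Int × Bool) (st : List (Int × Int × Int × Bool)) :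
    wStack K L (t :: st) = wItem K L t + wStack K L st := by simp [wStack]

theorem wStack_append (K L : Nat) (a b : List (Int × Int × Int × Bool)) :
    wStack K L (a ++ b) = wStack K L a + wStack K L b := by simp [wStack]

theorem wStack_singleton (K L : Nat) (t : Int × Int × Int × Bool) :
    wStack K L [t] = wItem K L t := by simp [wStack]

theorem wItem_true (K L : Nat) (s e li : Int) : wItem K L (s, e, li, true) = 1 := rfl

theorem wItem_false (K L : Nat) (s e li : Int) :
    wItem K L (s, e, li, false) = taskFuel_alt K L li := rfl

theorem wItem_subTask_le (K L : Nat) (li s e : Int) :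
    wItem K L (subTask_alt (L : Int) s e li) ≤ taskFuel_alt K L (li + 1) := by
  unfold subTask_alt
  split_ifs with h
  · exact le_of_eq (wItem_false K L s e (li + 1))
  · rw [wItem_true]; exact one_le_taskFuel K L (li + 1)

theorem wStack_itemsLoop_le (K L : Nat) (pl li : Int) :
    ∀ (ps : List Int) (cs ce : Int) (its : List (Int × Int × Int × Bool)),
      wStack K L (itemsLoop_alt (L : Int) pl li ps cs ce its).1 ≤
        wStack K L its + 2 * ps.length * taskFuel_alt K L (li + 1) := by
  intro ps
  induction ps with
  | nil =>
    intro cs ce its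
    simp only [itemsLoop_alt, List.length_nil]
    nlinarith
  | cons p rest ih =>
    intro cs ce its
    have hW := one_le_taskFuel K L (li + 1)
    by_cases h1 : p - cs < pl
    · simp only [itemsLoop_alt, if_pos h1, List.length_cons]
      have h := ih cs p its
      nlinarith
    · by_cases h2 : cs = ce
      · simp only [itemsLoop_alt, if_neg h1, if_pos h2, List.length_cons]
        have h := ih p p (its ++ [subTask_alt (L : Int) cs p li])
        rw [wStack_append, wStack_singleton] at h
        have hst := wItem_subTask_le K L li cs p
        nlinarith
      · by_cases h3 : p - ce ≥ pl
        · simp only [itemsLoop_alt, if_neg h1, if_neg h2, if_pos h3, List.length_cons]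
          have h := ih p p (its ++ [(cs, ce, li, true)] ++ [subTask_alt (L : Int) ce p li])
          rw [wStack_append, wStack_append, wStack_singleton, wStack_singleton,
            wItem_true] at h
          have hst := wItem_subTask_le K L li ce p
          nlinarith
        · simp only [itemsLoop_alt, if_neg h1, if_neg h2, if_neg h3, List.length_cons]
          have h := ih ce p (its ++ [(cs, ce, li, true)])
          rw [wStack_append, wStack_singleton, wItem_true] at h
          nlinarith

theorem wStack_regionItems_le (K L : Nat) (pl s e li : Int)
    (positions : List Int) (hlen : positions.length ≤ K) :
    wStack K L (regionItems_alt (L : Int) pl s e li positions) ≤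
      (2 * K + 2) * taskFuel_alt K L (li + 1) := by
  have hW := one_le_taskFuel K L (li + 1)
  simp only [regionItems_alt]
  rw [wStack_append]
  have hq1 : wStack K L (itemsLoop_alt (L : Int) pl li positions s s []).1 ≤
      2 * positions.length * taskFuel_alt K L (li + 1) := by
    have h := wStack_itemsLoop_le K L pl li positions s s []
    have hz : wStack K L ([] : List (Int × Int × Int × Bool)) = 0 := rfl
    omega
  have hmul : 2 * positions.length * taskFuel_alt K L (li + 1) ≤
      2 * K * taskFuel_alt K L (li + 1) := by
    have : 2 * positions.length ≤ 2 * K := by omega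
    exact Nat.mul_le_mul_right _ this
  have htail : wStack K L
      (if (itemsLoop_alt (L : Int) pl li positions s s []).2.1 < e then
        if e - (itemsLoop_alt (L : Int) pl li positions s s []).2.1 ≥ pl ∧
            (itemsLoop_alt (L : Int) pl li positions s s []).2.1 ≠
            (itemsLoop_alt (L : Int) pl li positions s s []).2.2 then
          [((itemsLoop_alt (L : Int) pl li positions s s []).2.1,
            (itemsLoop_alt (L : Int) pl li positions s s []).2.2, li, true),
           subTask_alt (L : Int) (itemsLoop_alt (L : Int) pl li positions s s []).2.2 e li]
        else if e - (itemsLoop_alt (L : Int) pl li positions s s []).2.1 ≥ pl then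
          [subTask_alt (L : Int) (itemsLoop_alt (L : Int) pl li positions s s []).2.1 e li]
        else [((itemsLoop_alt (L : Int) pl li positions s s []).2.1, e, li, true)]
      else []) ≤ 2 * taskFuel_alt K L (li + 1) := by
    split_ifs with h1 h2 h3
    · rw [wStack_cons, wStack_singleton, wItem_true]
      have := wItem_subTask_le K L li (itemsLoop_alt (L : Int) pl li positions s s []).2.2 e
      omega
    · rw [wStack_singleton]
      have := wItem_subTask_le K L li (itemsLoop_alt (L : Int) pl li positions s s []).2.1 e
      omega
    · rw [wStack_singleton, wItem_true]; omega
    · show wStack K L [] ≤ _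
      have : wStack K L ([] : List (Int × Int × Int × Bool)) = 0 := rfl
      omega
  nlinarith

theorem taskFuel_succ (K L : Nat) (li : Int) (hli : li < (L : Int)) :
    taskFuel_alt K L li = (2 * K + 3) * taskFuel_alt K L (li + 1) := by
  unfold taskFuel_alt
  have h : ((L : Int) - li).toNat = ((L : Int) - (li + 1)).toNat + 1 := by omega
  rw [h, pow_succ]
  ring

-- one region's A-output equals the flattened evaluation of the tasks it spawns
theorem region_eval (text : String) (bps : List (List Int)) (levels : List Int) (pl : Int)
    (rs re li : Int) (hse : ¬ rs ≥ re) (hli : ¬ li ≥ (levels.length : Int))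
    (hpos : ¬ ((bps.filter (fun entry =>
        (PySem.List.pyGetD entry 1 0 == PySem.List.pyGetD levels li 0) &&
        decide (rs < PySem.List.pyGetD entry 0 0) &&
        decide (PySem.List.pyGetD entry 0 0 < re))).map (fun entry => PySem.List.pyGetD entry 0 0)) = []) :
    chunkA_py text bps levels pl (((levels.length : Int) - li).toNat + 1) rs re li =
      ((regionItems_alt (levels.length : Int) pl rs re li
        ((bps.filter (fun entry =>
          (PySem.List.pyGetD entry 1 0 == PySem.List.pyGetD levels li 0) &&
          decide (rs < PySem.List.pyGetD entry 0 0) &&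
          decide (PySem.List.pyGetD entry 0 0 < re))).map (fun entry => PySem.List.pyGetD entry 0 0))).map
        (evalT text bps levels pl)).flatten := by
  have hfuel : ((levels.length : Int) - li).toNat = ((levels.length : Int) - (li + 1)).toNat + 1 := by
    omega
  set L : Int := (levels.length : Int) with hL
  set ps := (bps.filter (fun entry =>
      (PySem.List.pyGetD entry 1 0 == PySem.List.pyGetD levels li 0) &&
      decide (rs < PySem.List.pyGetD entry 0 0) &&
      decide (PySem.List.pyGetD entry 0 0 < re))).map (fun entry => PySem.List.pyGetD entry 0 0) with hps
  have hsub : ∀ s e : Int,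
      evalT text bps levels pl (subTask_alt L s e li) =
        (if li + 1 < L then
          chunkA_py text bps levels pl ((L - li).toNat) s e (li + 1)
        else [PySem.Str.slice text (some s) (some e)]) := by
    intro s e
    unfold subTask_alt
    by_cases h : li + 1 < L
    · rw [if_pos h, if_pos h]
      have he : evalT text bps levels pl (s, e, li + 1, false) =
          chunkA_py text bps levels pl (((levels.length : Int) - (li + 1)).toNat + 1) s e (li + 1) := by
        simp [evalT]
      rw [he, ← hL, hfuel]
    · rw [if_neg h, if_neg h]
      simp [evalT]
  have hlit : ∀ s e : Int, evalT text bps levels pl (s, e, li, true) =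
      [PySem.Str.slice text (some s) (some e)] := by intro s e; simp [evalT]
  conv_lhs => rw [chunkA_py]
  simp only [← hL]
  simp only [if_neg hse, if_neg hli, ← hps, if_neg hpos]
  rw [loopA_items text pl L li _ (evalT text bps levels pl) hlit hsub ps [] rs rs]
  unfold regionItems_alt
  simp only [List.map_append, List.flatten_append, List.nil_append]
  congr 1
  by_cases hnext : li + 1 < L <;>
    split_ifs with h1 h2 h3 <;>
      simp [hlit, hsub, hnext, List.flatten]

-- the worklist machine, run with enough fuel, outputs the concatenation of its tasks' meanings
theorem run_correct (text : String) (bps : List (List Int)) (levels : List Int) (pl : Int) :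
    ∀ (n : Nat) (stack : List (Int × Int × Int × Bool)) (out : List String),
      wStack bps.length levels.length stack ≤ n →
      run_alt text (buildIndex_alt bps) levels pl n stack out =
        out ++ (stack.map (evalT text bps levels pl)).flatten := by
  intro n
  induction n with
  | zero =>
    intro stack out h
    cases stack with
    | nil => simp [run_alt]
    | cons t st =>
      exfalso
      have h1 : 1 ≤ wItem bps.length levels.length t := by
        unfold wItem
        split <;> first | omega | exact one_le_taskFuel _ _ _
      rw [wStack_cons] at h
      omega
  | succ n ih =>
    intro stack out h
    cases stack with
    | nil => simp [run_alt]
    | cons t st =>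
      obtain ⟨s, e, li, emit⟩ := t
      rw [wStack_cons] at h
      cases emit with
      | true =>
        rw [wItem_true] at h
        simp only [run_alt]
        rw [ih st (out ++ [PySem.Str.slice text (some s) (some e)]) (by omega)]
        simp [evalT]
      | false =>
        rw [wItem_false] at h
        have hw : taskFuel_alt bps.length levels.length li +
            wStack bps.length levels.length st ≤ n + 1 := h
        have h1 := one_le_taskFuel bps.length levels.length li
        simp only [run_alt, Bool.false_eq_true]
        by_cases hse : s ≥ e
        · rw [if_pos hse, ih st out (by omega)]
          have : evalT text bps levels pl (s, e, li, false) = [] := by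
            simp only [evalT]
            rw [if_neg (by simp), chunkA_py.eq_def]
            simp [if_pos hse]
          simp [this]
        · rw [if_neg hse]
          by_cases hli : li ≥ (levels.length : Int)
          · rw [if_pos hli, ih st (out ++ [PySem.Str.slice text (some s) (some e)]) (by omega)]
            have : evalT text bps levels pl (s, e, li, false) =
                [PySem.Str.slice text (some s) (some e)] := by
              simp only [evalT]
              rw [if_neg (by simp), chunkA_py.eq_def]
              simp [if_neg hse, if_pos hli]
            simp [this]
          · have hfuel : ((levels.length : Int) - li).toNat =
                ((levels.length : Int) - (li + 1)).toNat + 1 := by omega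
            have hstep := taskFuel_succ bps.length levels.length li (by omega)
            rw [if_neg hli]
            rw [positions_eq bps (PySem.List.pyGetD levels li 0) s e]
            set ps := (bps.filter (fun entry =>
                (PySem.List.pyGetD entry 1 0 == PySem.List.pyGetD levels li 0) &&
                decide (s < PySem.List.pyGetD entry 0 0) &&
                decide (PySem.List.pyGetD entry 0 0 < e))).map
              (fun entry => PySem.List.pyGetD entry 0 0) with hps
            by_cases hpos : ps = []
            · rw [if_pos hpos]
              have hw' : wStack bps.length levels.length ((s, e, li + 1, false) :: st) ≤ n := by
                rw [wStack_cons, wItem_false]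
                have hf1 := one_le_taskFuel bps.length levels.length (li + 1)
                nlinarith
              rw [ih _ out hw']
              have : evalT text bps levels pl (s, e, li, false) =
                  evalT text bps levels pl (s, e, li + 1, false) := by
                simp only [evalT]
                rw [if_neg (by simp), if_neg (by simp), chunkA_py.eq_def]
                simp only [if_neg hse, if_neg hli, ← hps, if_pos hpos]
                rw [hfuel]
              simp [this]
            · rw [if_neg hpos]
              have hlen : ps.length ≤ bps.length := by
                rw [hps]
                simp only [List.length_map]
                exact List.length_filter_le _ _
              have hitems := wStack_regionItems_le bps.length levels.length pl s e li ps hlen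
              have hw' : wStack bps.length levels.length
                  (regionItems_alt (levels.length : Int) pl s e li ps ++ st) ≤ n := by
                rw [wStack_append]
                have hf1 := one_le_taskFuel bps.length levels.length (li + 1)
                nlinarith
              rw [ih _ out hw']
              have hregion : evalT text bps levels pl (s, e, li, false) =
                  ((regionItems_alt (levels.length : Int) pl s e li ps).map
                    (evalT text bps levels pl)).flatten := by
                simp only [evalT]
                rw [if_neg (by simp)]
                exact region_eval text bps levels pl s e li hse hli (hps ▸ hpos)
              simp [hregion]

-- ===== VERDICT (by name: the statement is the Claim_ definition above) =====
theorem chunk_text_at_level_py_spec : Claim_equal_chunk_text_at_level_py := by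
  intro text rs re bps levels li pl _ _
  unfold Spec_chunk_text_at_level_py chunk_text_at_level_py chunk_text_at_level_py_alt
  rw [run_correct text bps levels pl (taskFuel_alt bps.length levels.length li)
    [(rs, re, li, false)] [] (by rw [wStack_cons, wItem_false]; simp [wStack])]
  simp [evalT]
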